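-- pv_equiv track=rewrite | github.com/miliar/Code_Jam_Webscraper | Solutions_python/Problem_155/3545.py | get_people_required
-- ===== SOURCE A (Python) =====
-- def get_people_required (people_list):
-- 	no_of_people_required = 0
-- 	no_of_people_present = 0
-- 	shyness = -1
--
-- 	for each_position in people_list:
-- 		shyness += 1
--
-- 		if no_of_people_present <= shyness:
-- 			no_of_people_required += (shyness - no_of_people_present)
-- 			no_of_people_present += (shyness - no_of_people_present)
--
-- 		no_of_people_present += each_position
--
-- 	return no_of_people_required
-- ===== SOURCE B (Python) =====
-- def get_people_required(people_list):
--     needed = 0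
--     for x in reversed(people_list[:-1]):
--         needed = max(0, needed + 1 - x)
--     return needed
-- ===== Notes on version B (the rewrite author's own statement) =====
-- stated objective: simpler
-- what changed: Replaces A's forward greedy simulation with a mutable 'people present' count that gets topped up by a single backward pass over people_list[:-1] with the recurrence needed = max(0, needed + 1 - x).
import Mathlib
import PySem

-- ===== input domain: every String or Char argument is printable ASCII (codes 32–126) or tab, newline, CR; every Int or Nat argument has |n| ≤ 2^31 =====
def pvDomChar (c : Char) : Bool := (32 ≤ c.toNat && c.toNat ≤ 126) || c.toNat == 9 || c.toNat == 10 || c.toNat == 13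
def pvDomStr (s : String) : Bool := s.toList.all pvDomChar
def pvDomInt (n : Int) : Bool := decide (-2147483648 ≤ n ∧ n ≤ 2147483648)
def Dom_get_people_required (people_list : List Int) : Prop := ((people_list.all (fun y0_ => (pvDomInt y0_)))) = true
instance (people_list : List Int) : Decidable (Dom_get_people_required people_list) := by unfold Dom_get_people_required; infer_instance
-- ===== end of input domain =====

-- B replaces A's forward greedy simulation (mutable "people present" count topped up
-- at each position) with a single backward pass over people_list[:-1] using the
-- recurrence needed = max(0, needed + 1 - x); objective: simpler.

-- ===== PORT A =====
-- state: (no_of_people_required, no_of_people_present, shyness)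
def pvStepA (st : Int × Int × Int) (x : Int) : Int × Int × Int :=
  let shy := st.2.2 + 1
  if st.2.1 ≤ shy then
    (st.1 + (shy - st.2.1), st.2.1 + (shy - st.2.1) + x, shy)
  else
    (st.1, st.2.1 + x, shy)

def get_people_required (people_list : List Int) : Int :=
  (people_list.foldl pvStepA (0, 0, -1)).1

-- ===== PORT B =====
-- needed = 0; for x in reversed(people_list[:-1]): needed = max(0, needed + 1 - x)
def get_people_required_alt (people_list : List Int) : Int :=
  ((PySem.List.slice people_list none (some (-1))).reverse).foldl
    (fun needed x => max 0 (needed + 1 - x)) 0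

-- ===== PRECONDITION & SPEC =====
def Spec_get_people_required (people_list : List Int) (out : Int) : Prop := out = get_people_required_alt people_list
instance (people_list : List Int) (out : Int) : Decidable (Spec_get_people_required people_list out) := by unfold Spec_get_people_required; infer_instance

-- ===== CLAIM (what is proved, stated in full; the proofs are below) =====
def Claim_equal_get_people_required : Prop := ∀ (people_list : List Int), Dom_get_people_required people_list → Spec_get_people_required people_list (get_people_required people_list)

-- ===== LEMMAS AND PROOFS =====
-- F l = B's value: foldr form of the backward loop over dropLast
def pvF (l : List Int) : Int := l.dropLast.foldr (fun x m => max 0 (m + 1 - x)) 0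

theorem pvF_nonneg (l : List Int) : 0 ≤ pvF l := by
  unfold pvF
  induction l.dropLast with
  | nil => simp
  | cons x t ih => simp [List.foldr]

theorem pv_stepA_eq (req S i x : Int) :
    pvStepA (req, req + S, i - 1) x = (max req (i - S), max req (i - S) + (S + x), (i + 1) - 1) := by
  simp only [pvStepA]
  split_ifs with h <;> simp only [Prod.mk.injEq] <;> omega

theorem pv_main : ∀ (t : List Int) (x req S i : Int),
    ((x :: t).foldl pvStepA (req, req + S, i - 1)).1 = max req (i - S + pvF (x :: t)) := by
  intro t
  induction t with
  | nil =>
    intro x req S i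
    simp only [List.foldl_cons, List.foldl_nil, pv_stepA_eq]
    have : pvF [x] = 0 := by simp [pvF]
    omega
  | cons y t' ih =>
    intro x req S i
    rw [List.foldl_cons, pv_stepA_eq]
    have := ih y (max req (i - S)) (S + x) (i + 1)
    rw [this]
    have hF : pvF (x :: y :: t') = max 0 (pvF (y :: t') + 1 - x) := by
      simp [pvF, List.dropLast_cons₂]
    rw [hF]
    omega

theorem pv_alt_eq_F (l : List Int) : get_people_required_alt l = pvF l := by
  unfold get_people_required_alt pvF
  rw [PySem.List.slice_to_neg_one, List.foldl_reverse]

-- ===== VERDICT (by name: the statement is the Claim_ definition above) =====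
theorem get_people_required_spec : Claim_equal_get_people_required := by
  intro l _
  show get_people_required l = get_people_required_alt l
  rw [pv_alt_eq_F]
  cases l with
  | nil => simp [get_people_required, pvF]
  | cons x t =>
    have h := pv_main t x 0 0 0
    have hF := pvF_nonneg (x :: t)
    simp only [get_people_required]
    have : ((0 : Int), (0 : Int), (-1 : Int)) = (0, 0 + 0, 0 - 1) := by norm_num
    rw [this, h]
    omega
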